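-- pv_equiv track=rewrite | github.com/shubhamkaushal765/ac_roster | archive/final.py | build_model_inputs
-- ===== SOURCE A (Python) =====
-- slot_length = 15
--
-- def hhmm_to_slot(hhmm: str, slot_length=slot_length, NUM_SLOTS = 48):
--     """Convert 'HHMM' string to slot index. Default slot = 30 min."""
--     t = int(hhmm)
--     h = t // 100
--     m = t % 100
--     slot = (h - 10) * 4 + (m // slot_length)
--     return max(0, min(NUM_SLOTS - 1, slot))
--
-- def calculate_total_break2(officer_intervals):
--     officers_break_quota = {}
--     for officer in officer_intervals:
--         total_break = 0
--         for each_interval in officer_intervals[officer]: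
--             s, e = each_interval
--             if e - s >= 36:   # >= 9 hours
--                 total_break = 8
--                 break
--             elif e - s >= 20: # >= 5 hours
--                 total_break = max(total_break, 3)
--             elif e - s >= 10: # >= 2.5 hours
--                 total_break = max(total_break, 2)
--         officers_break_quota[officer] = total_break
--     return officers_break_quota
--
-- def build_model_inputs(input_avail: list[str], slot_length=slot_length):
--     officers = [f"O{i+1}" for i in range(len(input_avail))]
--     counters = [f"C{i+1}" for i in range(40)]  # 40 counters
--
--     sos_availability = {}
--     availability = {}
--     for i, avail_str in enumerate(input_avail):
--         intervals = [s.strip() for s in avail_str.split(",") if s.strip()]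
--         officer_intervals = []
--         for interval in intervals:
--             start_str, end_str = interval.split("-")
--             start_slot = hhmm_to_slot(start_str, slot_length)
--             end_slot = hhmm_to_slot(end_str, slot_length)
--             officer_intervals.append((start_slot, end_slot))
--         sos_availability[officers[i]] = officer_intervals
--         availability[officers[i]] = officer_intervals
--
--     break_requirements = calculate_total_break2(sos_availability)
--     return officers, counters, availability, break_requirements
-- ===== SOURCE B (Python) =====
-- slot_length = 15
--
-- def hhmm_to_slot(hhmm: str, slot_length=slot_length, NUM_SLOTS=48):
--     t = int(hhmm)
--     slot = (t // 100 - 10) * 4 + (t % 100) // slot_length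
--     return max(0, min(NUM_SLOTS - 1, slot))
--
-- def _quota(longest):
--     return 8 if longest >= 36 else 3 if longest >= 20 else 2 if longest >= 10 else 0
--
-- def build_model_inputs(input_avail: list[str], slot_length=slot_length):
--     counters = [f"C{i+1}" for i in range(40)]
--     officers = []
--     availability = {}
--     break_requirements = {}
--     for i, avail_str in enumerate(input_avail):
--         name = f"O{i+1}"
--         ivs = []
--         longest = 0
--         for part in avail_str.split(","):
--             part = part.strip()
--             if not part:
--                 continue
--             start_str, end_str = part.split("-")
--             s = hhmm_to_slot(start_str, slot_length)
--             e = hhmm_to_slot(end_str, slot_length)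
--             ivs.append((s, e))
--             longest = max(longest, e - s)
--         officers.append(name)
--         availability[name] = ivs
--         break_requirements[name] = _quota(longest)
--     return officers, counters, availability, break_requirements
-- ===== Notes on version B (the rewrite author's own statement) =====
-- stated objective: simpler
-- what changed: B fuses A's two phases into one pass: instead of building the availability dict and then rescanning it with calculate_total_break2's per-interval accumulate-with-early-break loop, B keeps a running maximum interval length while parsing each officer's string and classifies that maximum once (8/3/2/0).
import Mathlib
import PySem

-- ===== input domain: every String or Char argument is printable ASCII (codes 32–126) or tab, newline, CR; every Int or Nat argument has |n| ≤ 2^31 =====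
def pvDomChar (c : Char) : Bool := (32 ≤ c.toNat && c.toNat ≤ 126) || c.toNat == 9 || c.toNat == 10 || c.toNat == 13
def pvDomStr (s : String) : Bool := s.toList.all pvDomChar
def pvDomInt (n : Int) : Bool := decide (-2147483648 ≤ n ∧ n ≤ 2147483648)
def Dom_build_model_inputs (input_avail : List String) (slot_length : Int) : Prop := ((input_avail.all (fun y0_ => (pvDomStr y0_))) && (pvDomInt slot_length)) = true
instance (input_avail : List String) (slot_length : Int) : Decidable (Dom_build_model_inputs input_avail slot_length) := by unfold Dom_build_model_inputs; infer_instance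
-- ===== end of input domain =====

-- B replaces A's parse-then-rescan (second pass over the built dict with an
-- accumulate-with-early-break loop per officer) by one fused pass that keeps a
-- running maximum interval length per officer and classifies it once (objective: simpler).

-- ===== PORT A =====
-- helper hhmm_to_slot (module-level in Python, shared verbatim by A and B).
-- int(hhmm) raising ValueError and '// slot_length' raising ZeroDivisionError
-- are excluded by Pre_; the .getD defaults are never reached inside Pre_.
def hhmm_to_slot (hhmm : String) (slot_length : Int) : Int :=
  let t := (PySem.Int.ofStr? hhmm).getD 0
  let h := PySem.Int.floordiv t 100
  let m := PySem.Int.mod t 100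
  let slot := (h - 10) * 4 + PySem.Int.floordiv m slot_length
  max 0 (min (48 - 1) slot)

-- one interval '(start_slot, end_slot)': 'start_str, end_str = interval.split("-")' is a
-- 2-unpack (ValueError when not exactly 2 parts, excluded by Pre_, so .getD 0/1 is exact
-- there); the identical three lines occur in both Pythons, so both ports share this helper.
def pvIv (slot_length : Int) (interval : String) : Int × Int :=
  (hhmm_to_slot (((PySem.Str.split? interval "-").getD []).getD 0 "") slot_length,
   hhmm_to_slot (((PySem.Str.split? interval "-").getD []).getD 1 "") slot_length)

-- inner loop of A: intervals = [s.strip() for s in avail_str.split(",") if s.strip()],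
-- then for each interval append the (start_slot, end_slot) pair.
def pvIntervalLoopA (slot_length : Int) (avail_str : String) : List (Int × Int) :=
  ((((PySem.Str.split? avail_str ",").getD []).map PySem.Str.strip).filter
      (fun t => decide (t ≠ ""))).foldl
    (fun acc interval => acc ++ [pvIv slot_length interval])
    []

-- inner loop of calculate_total_break2 (with the early 'break' on >= 36)
def pvBreakLoop : List (Int × Int) → Int → Int
  | [], total_break => total_break
  | (s, e) :: rest, total_break =>
    if e - s ≥ 36 then 8
    else if e - s ≥ 20 then pvBreakLoop rest (max total_break 3)
    else if e - s ≥ 10 then pvBreakLoop rest (max total_break 2)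
    else pvBreakLoop rest total_break

-- calculate_total_break2: for officer in d: result[officer] = <inner loop over d[officer]>
def pvCalc2 (d : PySem.Dict String (List (Int × Int))) : PySem.Dict String Int :=
  d.keys.foldl
    (fun acc officer => acc.insert officer (pvBreakLoop (d.getD officer []) 0))
    PySem.Dict.empty

def build_model_inputs (input_avail : List String) (slot_length : Int) :
    List String × List String × (List (String × List (Int × Int))) × (List (String × Int)) :=
  let officers := (PySem.List.pyRange 0 input_avail.length).map
      (fun i => "O" ++ PySem.Int.toStr (i + 1))
  let counters := (PySem.List.pyRange 0 40).map (fun i => "C" ++ PySem.Int.toStr (i + 1))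
  -- the loop builds sos_availability and availability side by side
  let sa :=
    (PySem.List.enumerate input_avail).foldl
      (fun (st : PySem.Dict String (List (Int × Int)) × PySem.Dict String (List (Int × Int))) p =>
        (st.1.insert (PySem.List.pyGetD officers p.1 "") (pvIntervalLoopA slot_length p.2),
         st.2.insert (PySem.List.pyGetD officers p.1 "") (pvIntervalLoopA slot_length p.2)))
      (PySem.Dict.empty, PySem.Dict.empty)
  (officers, counters, sa.2.items, (pvCalc2 sa.1).items)

-- ===== PORT B =====
def pvQuota (longest : Int) : Int :=
  if longest ≥ 36 then 8 else if longest ≥ 20 then 3 else if longest ≥ 10 then 2 else 0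

-- fused inner loop of B: one pass over avail_str.split(",") building the interval
-- list and the running maximum interval length together ('continue' on blank parts)
def pvScanB (slot_length : Int) (avail_str : String) : List (Int × Int) × Int :=
  ((PySem.Str.split? avail_str ",").getD []).foldl
    (fun st part =>
      if PySem.Str.strip part = "" then st
      else
        (st.1 ++ [pvIv slot_length (PySem.Str.strip part)],
         max st.2 ((pvIv slot_length (PySem.Str.strip part)).2
                   - (pvIv slot_length (PySem.Str.strip part)).1)))
    ([], 0)

def build_model_inputs_alt (input_avail : List String) (slot_length : Int) :
    List String × List String × (List (String × List (Int × Int))) × (List (String × Int)) :=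
  let counters := (PySem.List.pyRange 0 40).map (fun i => "C" ++ PySem.Int.toStr (i + 1))
  let st :=
    (PySem.List.enumerate input_avail).foldl
      (fun (st : List String × PySem.Dict String (List (Int × Int)) × PySem.Dict String Int) p =>
        (st.1 ++ ["O" ++ PySem.Int.toStr (p.1 + 1)],
         st.2.1.insert ("O" ++ PySem.Int.toStr (p.1 + 1)) (pvScanB slot_length p.2).1,
         st.2.2.insert ("O" ++ PySem.Int.toStr (p.1 + 1)) (pvQuota (pvScanB slot_length p.2).2)))
      ([], PySem.Dict.empty, PySem.Dict.empty)
  (st.1, counters, st.2.1.items, st.2.2.items)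

-- ===== PRECONDITION & SPEC =====
-- A interval is well-formed when 'start-end' splits into exactly two int()-parseable
-- pieces (else ValueError) and slot_length ≠ 0 (else ZeroDivisionError in hhmm_to_slot).
def pvIntervalOK (slot_length : Int) (interval : String) : Bool :=
  match (PySem.Str.split? interval "-").getD [] with
  | [a, b] => (PySem.Int.ofStr? a).isSome && (PySem.Int.ofStr? b).isSome && decide (slot_length ≠ 0)
  | _ => false

-- Pre_ is exactly the set of inputs on which the Python A returns normally: every
-- stripped non-empty comma piece of every string is a well-formed interval.
def Pre_build_model_inputs (input_avail : List String) (slot_length : Int) : Prop :=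
  ∀ s ∈ input_avail,
    ∀ interval ∈ (((PySem.Str.split? s ",").getD []).map PySem.Str.strip).filter
        (fun t => decide (t ≠ "")),
      pvIntervalOK slot_length interval = true
instance (input_avail : List String) (slot_length : Int) : Decidable (Pre_build_model_inputs input_avail slot_length) := by unfold Pre_build_model_inputs; infer_instance

def pvWitness_build_model_inputs : List String × Int := (["1000-1130, 1200-1300", ""], 15)

def Spec_build_model_inputs (input_avail : List String) (slot_length : Int) (out : List String × List String × (List (String × List (Int × Int))) × (List (String × Int))) : Prop := out = build_model_inputs_alt input_avail slot_length
instance (input_avail : List String) (slot_length : Int) (out : List String × List String × (List (String × List (Int × Int))) × (List (String × Int))) : Decidable (Spec_build_model_inputs input_avail slot_length out) := by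
  unfold Spec_build_model_inputs
  -- infer_instance alone exceeds the default synthInstance size on this 4-tuple type
  exact @instDecidableEqProd _ _ inferInstance
    (@instDecidableEqProd _ _ inferInstance
      (@instDecidableEqProd _ _ inferInstance inferInstance)) _ _

-- ===== CLAIM (what is proved, stated in full; the proofs are below) =====
def Claim_equal_build_model_inputs : Prop := ∀ (input_avail : List String) (slot_length : Int), Dom_build_model_inputs input_avail slot_length → Pre_build_model_inputs input_avail slot_length → Spec_build_model_inputs input_avail slot_length (build_model_inputs input_avail slot_length)

-- ===== LEMMAS AND PROOFS =====

-- B's fused loop, split into its two independent components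
theorem pvScanB_fold (sl : Int) (l : List String) (acc : List (Int × Int) × Int) :
    l.foldl
      (fun st part =>
        if PySem.Str.strip part = "" then st
        else
          (st.1 ++ [pvIv sl (PySem.Str.strip part)],
           max st.2 ((pvIv sl (PySem.Str.strip part)).2 - (pvIv sl (PySem.Str.strip part)).1)))
      acc
    = (acc.1 ++ ((l.map PySem.Str.strip).filter (fun t => decide (t ≠ ""))).map (pvIv sl),
       ((l.map PySem.Str.strip).filter (fun t => decide (t ≠ ""))).foldl
         (fun m t => max m ((pvIv sl t).2 - (pvIv sl t).1)) acc.2) := by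
  induction l generalizing acc with
  | nil => simp
  | cons x xs IH =>
    by_cases h : PySem.Str.strip x = ""
    · simp [h, IH]
    · simp [h, IH]

theorem pvScanB_fst (sl : Int) (s : String) :
    (pvScanB sl s).1 = pvIntervalLoopA sl s := by
  unfold pvScanB pvIntervalLoopA
  rw [pvScanB_fold, PySem.List.foldl_append_singleton_eq_map]

-- A's accumulate-with-early-break loop computes the classification of the running maximum
theorem pvBreakLoop_eq_quota (ivs : List (Int × Int)) :
    ∀ L0 : Int, L0 < 36 →
      pvBreakLoop ivs (pvQuota L0) = pvQuota (ivs.foldl (fun m q => max m (q.2 - q.1)) L0) := by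
  induction ivs with
  | nil => intro L0 _; rfl
  | cons q rest IH =>
    intro L0 h
    obtain ⟨s, e⟩ := q
    simp only [List.foldl_cons]
    rw [pvBreakLoop]
    by_cases h36 : e - s ≥ 36
    · rw [if_pos h36]
      have hmax := (PySem.List.le_foldl_max_int rest (fun q => q.2 - q.1) (max L0 (e - s))).1
      have h36' : (36 : Int) ≤ rest.foldl (fun m q => max m (q.2 - q.1)) (max L0 (e - s)) :=
        le_trans (le_trans h36 (le_max_right _ _)) hmax
      unfold pvQuota
      rw [if_pos h36']
    · by_cases h20 : e - s ≥ 20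
      · rw [if_neg h36, if_pos h20]
        have hm36 : max L0 (e - s) < 36 := max_lt h (by omega)
        have hq : max (pvQuota L0) 3 = pvQuota (max L0 (e - s)) := by
          simp only [pvQuota, max_def]; split_ifs <;> omega
        rw [hq, IH _ hm36]
      · by_cases h10 : e - s ≥ 10
        · rw [if_neg h36, if_neg h20, if_pos h10]
          have hm36 : max L0 (e - s) < 36 := max_lt h (by omega)
          have hq : max (pvQuota L0) 2 = pvQuota (max L0 (e - s)) := by
            simp only [pvQuota, max_def]; split_ifs <;> omega
          rw [hq, IH _ hm36]
        · rw [if_neg h36, if_neg h20, if_neg h10]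
          have hm36 : max L0 (e - s) < 36 := max_lt h (by omega)
          have hq : pvQuota L0 = pvQuota (max L0 (e - s)) := by
            simp only [pvQuota, max_def]; split_ifs <;> omega
          rw [hq, IH _ hm36]

theorem pvQuota_scanB (sl : Int) (s : String) :
    pvQuota ((pvScanB sl s).2) = pvBreakLoop (pvIntervalLoopA sl s) 0 := by
  have h0 : pvQuota (0 : Int) = 0 := by norm_num [pvQuota]
  rw [show pvBreakLoop (pvIntervalLoopA sl s) 0 = pvBreakLoop (pvIntervalLoopA sl s) (pvQuota 0) by rw [h0]]
  rw [pvBreakLoop_eq_quota _ 0 (by norm_num)]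
  unfold pvScanB
  rw [pvScanB_fold]
  rw [← pvScanB_fst sl s]
  unfold pvScanB
  rw [pvScanB_fold]
  simp [List.foldl_map]

-- item-wise image of A's per-officer loop
def pvPhi (q : String × List (Int × Int)) : String × Int := (q.1, pvBreakLoop q.2 0)

theorem pv_contains_mk_map (d : PySem.Dict String (List (Int × Int))) (k : String) :
    (PySem.Dict.mk (d.items.map pvPhi)).contains k = d.contains k := by
  rw [PySem.Dict.contains_mk, List.any_map]
  have hd : d.contains k = d.items.any (fun p => p.1 == k) := PySem.Dict.contains_mk d.items k
  rw [hd]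
  rfl

theorem pv_mk_map_insert (d : PySem.Dict String (List (Int × Int))) (k : String)
    (v : List (Int × Int)) :
    PySem.Dict.mk (((d.insert k v).items).map pvPhi)
      = (PySem.Dict.mk (d.items.map pvPhi)).insert k (pvBreakLoop v 0) := by
  apply PySem.Dict.ext
  show ((d.insert k v).items).map pvPhi = _
  rw [PySem.Dict.items_insert, PySem.Dict.items_insert, pv_contains_mk_map]
  by_cases c : d.contains k
  · simp only [c, if_pos, List.map_map]
    apply List.map_congr_left
    intro p _
    by_cases hp : p.1 == k
    · simp [pvPhi, hp, Function.comp]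
    · simp [pvPhi, hp, Function.comp]
  · simp [c, pvPhi]

theorem pv_foldl_insert_map (l : List (Int × String)) (key : Int × String → String)
    (val : Int × String → List (Int × Int)) :
    ∀ d : PySem.Dict String (List (Int × Int)),
      PySem.Dict.mk ((l.foldl (fun d p => d.insert (key p) (val p)) d).items.map pvPhi)
        = l.foldl (fun d p => d.insert (key p) (pvBreakLoop (val p) 0))
            (PySem.Dict.mk (d.items.map pvPhi)) := by
  induction l with
  | nil => intro d; rfl
  | cons x xs IH =>
    intro d
    simp only [List.foldl_cons]
    rw [IH, pv_mk_map_insert]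

theorem pvCalc2_eq (d : PySem.Dict String (List (Int × Int))) (hnd : d.keys.Nodup) :
    pvCalc2 d = PySem.Dict.mk (d.items.map pvPhi) := by
  unfold pvCalc2
  have hk : d.keys = d.items.map (fun q => q.1) := rfl
  rw [hk, List.foldl_map]
  have hcong : ∀ (acc : PySem.Dict String Int), ∀ q ∈ d.items,
      acc.insert q.1 (pvBreakLoop (d.getD q.1 []) 0) = acc.insert q.1 (pvBreakLoop q.2 0) := by
    intro acc q hq
    have hv : d.getD q.1 [] = q.2 := PySem.Dict.getD_of_mem_items d hq hnd []
    rw [hv]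
  rw [PySem.List.foldl_congr_mem d.items _ _ PySem.Dict.empty hcong]
  apply PySem.Dict.ext
  rw [PySem.Dict.items_foldl_insert_fresh d.items (fun q => q.1) (fun q => pvBreakLoop q.2 0)
      PySem.Dict.empty (fun a _ => PySem.Dict.contains_empty _) (by rw [← hk]; exact hnd)]
  rfl

theorem pv_main (input_avail : List String) (slot_length : Int) :
    build_model_inputs input_avail slot_length = build_model_inputs_alt input_avail slot_length := by
  simp only [build_model_inputs, build_model_inputs_alt]
  -- split B's three-accumulator loop and A's two-dict loop into independent folds
  rw [PySem.List.foldl_prod_mk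
      (f := fun (os : List String) (p : Int × String) => os ++ ["O" ++ PySem.Int.toStr (p.1 + 1)])
      (g := fun (d2 : PySem.Dict String (List (Int × Int)) × PySem.Dict String Int) (p : Int × String) =>
        (d2.1.insert ("O" ++ PySem.Int.toStr (p.1 + 1)) (pvScanB slot_length p.2).1,
         d2.2.insert ("O" ++ PySem.Int.toStr (p.1 + 1)) (pvQuota (pvScanB slot_length p.2).2)))]
  rw [PySem.List.foldl_prod_mk
      (f := fun (d : PySem.Dict String (List (Int × Int))) (p : Int × String) =>
        d.insert ("O" ++ PySem.Int.toStr (p.1 + 1)) (pvScanB slot_length p.2).1)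
      (g := fun (d : PySem.Dict String Int) (p : Int × String) =>
        d.insert ("O" ++ PySem.Int.toStr (p.1 + 1)) (pvQuota (pvScanB slot_length p.2).2))]
  rw [PySem.List.foldl_prod_mk
      (f := fun (d : PySem.Dict String (List (Int × Int))) (p : Int × String) =>
        d.insert (PySem.List.pyGetD
          ((PySem.List.pyRange 0 input_avail.length).map (fun i => "O" ++ PySem.Int.toStr (i + 1)))
          p.1 "") (pvIntervalLoopA slot_length p.2))
      (g := fun (d : PySem.Dict String (List (Int × Int))) (p : Int × String) =>
        d.insert (PySem.List.pyGetD
          ((PySem.List.pyRange 0 input_avail.length).map (fun i => "O" ++ PySem.Int.toStr (i + 1)))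
          p.1 "") (pvIntervalLoopA slot_length p.2))]
  dsimp only
  have hKey : ∀ p ∈ PySem.List.enumerate input_avail 0,
      PySem.List.pyGetD
        ((PySem.List.pyRange 0 input_avail.length).map (fun i => "O" ++ PySem.Int.toStr (i + 1)))
        p.1 "" = "O" ++ PySem.Int.toStr (p.1 + 1) := by
    intro p hp
    rw [PySem.List.mem_enumerate_iff] at hp
    obtain ⟨k, hk, rfl⟩ := hp
    exact PySem.List.pyGetD_map_pyRange_of_nonneg _ _ _ _ (by omega) (by omega)
  -- officers
  have hOff : (PySem.List.enumerate input_avail 0).foldl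
      (fun os p => os ++ ["O" ++ PySem.Int.toStr (p.1 + 1)]) ([] : List String)
      = (PySem.List.pyRange 0 input_avail.length).map (fun i => "O" ++ PySem.Int.toStr (i + 1)) := by
    rw [PySem.List.foldl_append_singleton_eq_map
        (f := fun p : Int × String => "O" ++ PySem.Int.toStr (p.1 + 1))]
    rw [show (fun p : Int × String => "O" ++ PySem.Int.toStr (p.1 + 1))
        = (fun i : Int => "O" ++ PySem.Int.toStr (i + 1)) ∘ (fun p : Int × String => p.1) from rfl]
    rw [← List.map_map, PySem.List.map_fst_enumerate]
    simp
  -- availability dict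
  have hAv : (PySem.List.enumerate input_avail 0).foldl
      (fun (d : PySem.Dict String (List (Int × Int))) (p : Int × String) =>
        d.insert (PySem.List.pyGetD
          ((PySem.List.pyRange 0 input_avail.length).map (fun i => "O" ++ PySem.Int.toStr (i + 1)))
          p.1 "") (pvIntervalLoopA slot_length p.2)) PySem.Dict.empty
      = (PySem.List.enumerate input_avail 0).foldl
        (fun (d : PySem.Dict String (List (Int × Int))) (p : Int × String) =>
          d.insert ("O" ++ PySem.Int.toStr (p.1 + 1)) (pvScanB slot_length p.2).1)
        PySem.Dict.empty := by
    apply PySem.List.foldl_congr_mem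
    intro acc p hp
    rw [hKey p hp, pvScanB_fst]
  -- break-quota dict
  have hnd : ((PySem.List.enumerate input_avail 0).foldl
      (fun (d : PySem.Dict String (List (Int × Int))) (p : Int × String) =>
        d.insert (PySem.List.pyGetD
          ((PySem.List.pyRange 0 input_avail.length).map (fun i => "O" ++ PySem.Int.toStr (i + 1)))
          p.1 "") (pvIntervalLoopA slot_length p.2)) PySem.Dict.empty).keys.Nodup := by
    exact PySem.Dict.nodup_keys_foldl_insert_key (PySem.List.enumerate input_avail 0)
      (fun p => PySem.List.pyGetD
        ((PySem.List.pyRange 0 input_avail.length).map (fun i => "O" ++ PySem.Int.toStr (i + 1)))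
        p.1 "")
      (fun _ p => pvIntervalLoopA slot_length p.2) PySem.Dict.empty PySem.Dict.nodup_keys_empty
  have hBr : pvCalc2 ((PySem.List.enumerate input_avail 0).foldl
      (fun (d : PySem.Dict String (List (Int × Int))) (p : Int × String) =>
        d.insert (PySem.List.pyGetD
          ((PySem.List.pyRange 0 input_avail.length).map (fun i => "O" ++ PySem.Int.toStr (i + 1)))
          p.1 "") (pvIntervalLoopA slot_length p.2)) PySem.Dict.empty)
      = (PySem.List.enumerate input_avail 0).foldl
        (fun (d : PySem.Dict String Int) (p : Int × String) =>
          d.insert ("O" ++ PySem.Int.toStr (p.1 + 1)) (pvQuota (pvScanB slot_length p.2).2))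
        PySem.Dict.empty := by
    rw [pvCalc2_eq _ hnd]
    rw [pv_foldl_insert_map (PySem.List.enumerate input_avail 0)
        (fun p => PySem.List.pyGetD
          ((PySem.List.pyRange 0 input_avail.length).map (fun i => "O" ++ PySem.Int.toStr (i + 1)))
          p.1 "")
        (fun p => pvIntervalLoopA slot_length p.2) PySem.Dict.empty]
    have he : PySem.Dict.mk (((PySem.Dict.empty : PySem.Dict String (List (Int × Int))).items).map pvPhi)
        = (PySem.Dict.empty : PySem.Dict String Int) := rfl
    rw [he]
    apply PySem.List.foldl_congr_mem
    intro acc p hp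
    rw [hKey p hp, pvQuota_scanB]
  rw [hOff, hBr, hAv]

-- ===== VERDICT (by name: the statement is the Claim_ definition above) =====
theorem build_model_inputs_spec : Claim_equal_build_model_inputs := by
  intro input_avail slot_length _ _
  unfold Spec_build_model_inputs
  exact pv_main input_avail slot_length
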